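-- pv_equiv track=rewrite | github.com/bauworks/playground | python/ladder/ladder.py | convert_to_ladder_program
-- ===== SOURCE A (Python) =====
-- def convert_to_ladder_program(connections, current_point):
--     ladder_program = []
--     if current_point in connections:
--         destinations = connections[current_point]
--         for destination in destinations:
--             ladder_program.extend(convert_to_ladder_program(connections, destination))
--         if len(destinations) > 1:
--             ladder_program.insert(0, "OR " + " OR ".join(destinations))
--         ladder_program.insert(0, "AND " + current_point)
--     else:
--         ladder_program.append("LD " + current_point)
--     return ladder_program
-- ===== SOURCE B (Python) =====
-- def convert_to_ladder_program(connections, current_point):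
--     # Iterative DFS with an explicit worklist stack and a single append-only
--     # output list (no recursion, no insert(0)/extend splicing of sublists).
--     out = []
--     stack = [current_point]
--     while stack:
--         p = stack.pop()
--         if p in connections:
--             destinations = connections[p]
--             out.append("AND " + p)
--             if len(destinations) > 1:
--                 out.append("OR " + " OR ".join(destinations))
--             stack.extend(reversed(destinations))
--         else:
--             out.append("LD " + p)
--     return out
-- ===== Notes on version B (the rewrite author's own statement) =====
-- stated objective: alternative
-- what changed: B replaces A's per-node recursion (which builds each subtree's list separately and splices it into the parent via insert(0)/extend) with an iterative DFS over an explicit worklist stack that appends each instruction once to a single output list.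
import Mathlib
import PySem

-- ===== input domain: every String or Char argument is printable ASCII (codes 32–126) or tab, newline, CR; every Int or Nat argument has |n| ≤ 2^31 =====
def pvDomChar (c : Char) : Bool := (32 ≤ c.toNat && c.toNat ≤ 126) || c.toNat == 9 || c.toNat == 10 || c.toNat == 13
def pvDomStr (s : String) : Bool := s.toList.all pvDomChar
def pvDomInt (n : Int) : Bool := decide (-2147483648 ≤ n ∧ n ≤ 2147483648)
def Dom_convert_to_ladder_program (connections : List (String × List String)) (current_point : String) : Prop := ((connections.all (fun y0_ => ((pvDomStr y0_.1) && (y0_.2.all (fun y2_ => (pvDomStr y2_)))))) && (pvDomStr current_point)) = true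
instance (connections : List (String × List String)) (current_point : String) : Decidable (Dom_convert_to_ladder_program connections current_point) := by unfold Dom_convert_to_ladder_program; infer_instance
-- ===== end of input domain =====

-- B walks the graph iteratively with an explicit worklist stack, appending each
-- instruction once to a single output list, instead of A's recursion that splices
-- per-subtree lists together via insert(0)/extend.

-- ===== PORT A =====
-- Python A recurses on the graph; the recursion is bounded by a fuel counter.  Inside
-- Pre_ (no cycle reachable from current_point) a recursion chain never repeats a key,
-- so fuel connections.length + 1 is never exhausted there.
def pvConvA (connections : PySem.Dict String (List String)) : Nat → String → List String
  | 0, _ => []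
  | fuel + 1, current_point =>
    match PySem.Dict.get? connections current_point with
    | some destinations =>
        -- for destination in destinations: ladder_program.extend(convert_to_ladder_program(...))
        let ladder_program :=
          destinations.foldl (fun acc d => acc ++ pvConvA connections fuel d) []
        -- if len(destinations) > 1: ladder_program.insert(0, "OR " + " OR ".join(destinations))
        let ladder_program :=
          if destinations.length > 1 then
            ("OR " ++ PySem.Str.join " OR " destinations) :: ladder_program
          else ladder_program
        -- ladder_program.insert(0, "AND " + current_point)
        ("AND " ++ current_point) :: ladder_program
    | none => ["LD " ++ current_point]

def convert_to_ladder_program (connections : List (String × List String)) (current_point : String) : List String :=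
  pvConvA (PySem.Dict.ofList connections) (connections.length + 1) current_point

-- ===== PORT B =====
-- Fuel bound for B's while-loop: the number of pops the loop performs when started
-- on p (the size of the expansion tree, truncated at the given depth).
def pvSize (connections : PySem.Dict String (List String)) : Nat → String → Nat
  | 0, _ => 1
  | fuel + 1, p =>
    match PySem.Dict.get? connections p with
    | some destinations => 1 + (destinations.map (pvSize connections fuel)).sum
    | none => 1

-- The while loop of Source B.  The Lean stack keeps its TOP AT THE HEAD (the reverse of
-- the Python list), so Python's `stack.pop()` + `stack.extend(reversed(ds))` is
-- exactly `p :: stack` → `ds ++ stack`.  Each iteration consumes one fuel.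
def pvLoopB (connections : PySem.Dict String (List String)) : Nat → List String → List String → List String
  | 0, _, out => out
  | _ + 1, [], out => out
  | fuel + 1, p :: stack, out =>
    match PySem.Dict.get? connections p with
    | some destinations =>
        let out := out ++ ["AND " ++ p]
        let out :=
          if destinations.length > 1 then
            out ++ ["OR " ++ PySem.Str.join " OR " destinations]
          else out
        pvLoopB connections fuel (destinations ++ stack) out
    | none => pvLoopB connections fuel stack (out ++ ["LD " ++ p])

def convert_to_ladder_program_alt (connections : List (String × List String)) (current_point : String) : List String :=
  let c := PySem.Dict.ofList connections
  pvLoopB c (pvSize c (connections.length + 1) current_point) [current_point] []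

-- ===== PRECONDITION & SPEC =====
-- Pre_ excludes exactly the inputs where a cycle in `connections` is reachable from
-- current_point: there Python A recurses forever (RecursionError), returning no value.
-- pvAcyc is a shape condition on the input graph alone (it inspects only the keys and
-- their successor lists, producing no output): pvAcyc fuel p = true ↔ every successor
-- chain from p ends (in a non-key) within `fuel` steps; with fuel = #entries + 1 this
-- holds iff no cycle is reachable from current_point.
def pvAcyc (connections : PySem.Dict String (List String)) : Nat → String → Bool
  | 0, _ => false
  | fuel + 1, p =>
    match PySem.Dict.get? connections p with
    | some destinations => destinations.all (pvAcyc connections fuel)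
    | none => true

def Pre_convert_to_ladder_program (connections : List (String × List String)) (current_point : String) : Prop :=
  pvAcyc (PySem.Dict.ofList connections) (connections.length + 1) current_point = true

instance (connections : List (String × List String)) (current_point : String) : Decidable (Pre_convert_to_ladder_program connections current_point) := by
  unfold Pre_convert_to_ladder_program; infer_instance

def pvWitness_convert_to_ladder_program : (List (String × List String)) × String :=
  ([("a", ["b", "b"]), ("b", ["c"])], "a")

def Spec_convert_to_ladder_program (connections : List (String × List String)) (current_point : String) (out : List String) : Prop := out = convert_to_ladder_program_alt connections current_point
instance (connections : List (String × List String)) (current_point : String) (out : List String) : Decidable (Spec_convert_to_ladder_program connections current_point out) := by unfold Spec_convert_to_ladder_program; infer_instance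

-- ===== CLAIM (what is proved, stated in full; the proofs are below) =====
def Claim_equal_convert_to_ladder_program : Prop := ∀ (connections : List (String × List String)) (current_point : String), Dom_convert_to_ladder_program connections current_point → Pre_convert_to_ladder_program connections current_point → Spec_convert_to_ladder_program connections current_point (convert_to_ladder_program connections current_point)

-- ===== LEMMAS AND PROOFS =====

-- Running the worklist loop on p :: stack with enough fuel first emits A's program
-- for p, consuming exactly pvSize fuel, then continues with the rest of the stack.
theorem pvLoopB_spec (connections : PySem.Dict String (List String)) :
    ∀ (df : Nat) (p : String), pvAcyc connections df p = true →
      ∀ (lf : Nat) (stack out : List String), pvSize connections df p ≤ lf →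
        pvLoopB connections lf (p :: stack) out
          = pvLoopB connections (lf - pvSize connections df p) stack
              (out ++ pvConvA connections df p) := by
  intro df
  induction df with
  | zero => intro p h; simp [pvAcyc] at h
  | succ df ih =>
    intro p hacyc lf stack out hlf
    cases h : PySem.Dict.get? connections p with
    | none =>
      simp only [pvAcyc, pvSize, pvConvA, h] at hacyc hlf ⊢
      obtain ⟨lf', rfl⟩ : ∃ lf', lf = lf' + 1 := ⟨lf - 1, by omega⟩
      simp [pvLoopB, h]
    | some ds =>
      simp only [pvAcyc, pvSize, pvConvA, h] at hacyc hlf ⊢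
      obtain ⟨lf', rfl⟩ : ∃ lf', lf = lf' + 1 := ⟨lf - 1, by omega⟩
      have hlf' : (ds.map (pvSize connections df)).sum ≤ lf' := by omega
      have hall : ∀ d ∈ ds, pvAcyc connections df d = true := by
        simpa [List.all_eq_true] using hacyc
      have inner : ∀ (t : List String), (∀ d ∈ t, pvAcyc connections df d = true) →
          ∀ (lf : Nat) (stack out : List String),
            (t.map (pvSize connections df)).sum ≤ lf →
            pvLoopB connections lf (t ++ stack) out
              = pvLoopB connections (lf - (t.map (pvSize connections df)).sum) stack
                  (out ++ t.flatMap (pvConvA connections df)) := by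
        intro t
        induction t with
        | nil => intro _ lf stack out _; simp
        | cons d t iht =>
          intro hmem lf stack out hle
          simp only [List.map_cons, List.sum_cons] at hle ⊢
          have hd := hmem d (List.mem_cons_self ..)
          have hdle : pvSize connections df d ≤ lf := by omega
          rw [List.cons_append, ih d hd lf (t ++ stack) out hdle,
            iht (fun x hx => hmem x (List.mem_cons_of_mem _ hx)) _ stack _ (by omega)]
          have harith2 : lf - pvSize connections df d - (t.map (pvSize connections df)).sum
              = lf - (pvSize connections df d + (t.map (pvSize connections df)).sum) := by omega
          simp [List.flatMap_cons, harith2]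
      simp only [pvLoopB, h]
      rw [inner ds hall lf' stack _ hlf', PySem.List.foldl_append_eq_flatMap]
      have harith : lf' + 1 - (1 + (ds.map (pvSize connections df)).sum)
          = lf' - (ds.map (pvSize connections df)).sum := by omega
      rw [harith]
      split_ifs <;> simp

-- ===== VERDICT (by name: the statement is the Claim_ definition above) =====
theorem convert_to_ladder_program_spec : Claim_equal_convert_to_ladder_program := by
  intro connections current_point _hdom hpre
  unfold Spec_convert_to_ladder_program convert_to_ladder_program convert_to_ladder_program_alt
  rw [pvLoopB_spec (PySem.Dict.ofList connections) (connections.length + 1) current_point hpre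
    _ [] [] (le_refl _)]
  simp [pvLoopB]
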